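-- pv_equiv track=rewrite | github.com/hansrajdas/algorithms | Level-3/letter_and_numbers.py | get_longest_match
-- ===== SOURCE A (Python) =====
-- def get_longest_match(delta):
--     delta_to_indices = {0: -1}
--     res = {
--         'start': 0,
--         'end': 0
--     }
--     for i in range(len(delta)):
--         if delta[i] not in delta_to_indices:
--             delta_to_indices[delta[i]] = i
--         else:
--             start = delta_to_indices[delta[i]]
--             longest = res['end'] - res['start']
--             if i - start > longest:
--                 res['start'] = start
--                 res['end'] = i
--     return res
-- ===== SOURCE B (Python) =====
-- def get_longest_match(delta):
--     # Two-pass: per-value (first, last) indices, then pick best span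
--     # (max length, tie -> smaller end), instead of A's online scan.
--     first = {0: -1}
--     last = {}
--     for i, v in enumerate(delta):
--         if v not in first:
--             first[v] = i
--         last[v] = i
--     best_len, best_start, best_end = 0, 0, 0
--     for v, e in last.items():
--         s = first[v]
--         if e - s > best_len or (e - s == best_len and e < best_end):
--             best_len, best_start, best_end = e - s, s, e
--     return {'start': best_start, 'end': best_end}
-- ===== Notes on version B (the rewrite author's own statement) =====
-- stated objective: alternative
-- what changed: Replaces A's online scan (first-index dict plus running best updated at every repeat occurrence) by a two-pass scheme: one pass records per-value (first, last) index pairs, a second pass over the distinct values picks the span maximizing length with ties broken toward the smaller end index.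
import Mathlib
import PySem

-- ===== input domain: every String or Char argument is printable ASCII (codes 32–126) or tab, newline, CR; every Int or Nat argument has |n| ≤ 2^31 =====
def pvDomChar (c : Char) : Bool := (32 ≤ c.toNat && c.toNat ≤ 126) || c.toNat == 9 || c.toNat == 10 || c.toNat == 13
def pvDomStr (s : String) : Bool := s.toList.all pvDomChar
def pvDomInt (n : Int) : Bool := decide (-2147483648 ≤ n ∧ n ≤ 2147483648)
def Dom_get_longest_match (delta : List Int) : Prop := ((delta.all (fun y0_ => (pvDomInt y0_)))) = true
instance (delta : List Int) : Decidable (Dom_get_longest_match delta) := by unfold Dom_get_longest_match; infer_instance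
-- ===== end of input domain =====

-- B replaces A's online best-update scan by a two-pass scheme (per-value first/last indices,
-- then a max-by-span pass over the distinct values); same cost, different decomposition.

-- ===== PORT A =====
-- loop body of A: st = (delta_to_indices, res); res carried as the dict {'start': …, 'end': …}
def pvStepA (delta : List Int) (st : PySem.Dict Int Int × PySem.Dict String Int) (i : Int) :
    PySem.Dict Int Int × PySem.Dict String Int :=
  let x := PySem.List.pyGetD delta i 0   -- delta[i]; i ∈ range(len(delta)) is always in range
  match st.1.get? x with
  | none => (st.1.insert x i, st.2)
  | some start =>
      let longest := st.2.getD "end" 0 - st.2.getD "start" 0   -- both keys are always present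
      if i - start > longest then (st.1, (st.2.insert "start" start).insert "end" i) else st

def get_longest_match (delta : List Int) : List (String × Int) :=
  let st := (PySem.List.pyRange 0 (delta.length : Int) 1).foldl (pvStepA delta)
    (PySem.Dict.ofList [(0, -1)], PySem.Dict.ofList [("start", 0), ("end", 0)])
  st.2.items

-- ===== PORT B =====
-- pass 1 of B: st = (first, last); p = (i, v) from enumerate(delta)
def pvStepScan (st : PySem.Dict Int Int × PySem.Dict Int Int) (p : Int × Int) :
    PySem.Dict Int Int × PySem.Dict Int Int :=
  ((if st.1.contains p.2 then st.1 else st.1.insert p.2 p.1), st.2.insert p.2 p.1)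

-- pass 2 of B: b = (best_len, best_start, best_end); p = (v, e) from last.items()
def pvStepBest (first : PySem.Dict Int Int) (b : Int × Int × Int) (p : Int × Int) :
    Int × Int × Int :=
  let s := first.getD p.1 0   -- first[v]; every key of last is a key of first
  if p.2 - s > b.1 ∨ (p.2 - s = b.1 ∧ p.2 < b.2.2) then (p.2 - s, s, p.2) else b

def get_longest_match_alt (delta : List Int) : List (String × Int) :=
  let fl := (PySem.List.enumerate delta 0).foldl pvStepScan
    (PySem.Dict.ofList [(0, -1)], PySem.Dict.empty)
  let b := fl.2.items.foldl (pvStepBest fl.1) (0, 0, 0)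
  [("start", b.2.1), ("end", b.2.2)]

-- ===== PRECONDITION & SPEC =====
def Spec_get_longest_match (delta : List Int) (out : List (String × Int)) : Prop := out = get_longest_match_alt delta
instance (delta : List Int) (out : List (String × Int)) : Decidable (Spec_get_longest_match delta out) := by unfold Spec_get_longest_match; infer_instance

-- ===== CLAIM (what is proved, stated in full; the proofs are below) =====
def Claim_equal_get_longest_match : Prop := ∀ (delta : List Int), Dom_get_longest_match delta → Spec_get_longest_match delta (get_longest_match delta)

-- ===== LEMMAS AND PROOFS =====

-- abstract selection step of B's second pass: keep the better of best b and candidate c = (len, start, end)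
def pvSel (b c : Int × Int × Int) : Int × Int × Int :=
  if c.1 > b.1 ∨ (c.1 = b.1 ∧ c.2.2 < b.2.2) then c else b

-- candidate list of B's second pass
def pvCands (F : PySem.Dict Int Int) (l : List (Int × Int)) : List (Int × Int × Int) :=
  l.map (fun p => (p.2 - F.getD p.1 0, F.getD p.1 0, p.2))

-- the A-side fold, the B-side first pass, and B's second-pass result, as named states
def pvA (delta : List Int) : PySem.Dict Int Int × PySem.Dict String Int :=
  (PySem.List.pyRange 0 (delta.length : Int) 1).foldl (pvStepA delta)
    (PySem.Dict.ofList [(0, -1)], PySem.Dict.ofList [("start", 0), ("end", 0)])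

def pvB (delta : List Int) : PySem.Dict Int Int × PySem.Dict Int Int :=
  (PySem.List.enumerate delta 0).foldl pvStepScan (PySem.Dict.ofList [(0, -1)], PySem.Dict.empty)

def pvBest (delta : List Int) : Int × Int × Int :=
  (pvCands (pvB delta).1 (pvB delta).2.items).foldl pvSel (0, 0, 0)

-- the shape A's res dict always has
def pvR (a b : Int) : PySem.Dict String Int := (PySem.Dict.empty.insert "start" a).insert "end" b

lemma pvR_getD_start (a b : Int) : (pvR a b).getD "start" 0 = a := rfl
lemma pvR_getD_end (a b : Int) : (pvR a b).getD "end" 0 = b := rfl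
lemma pvR_items (a b : Int) : (pvR a b).items = [("start", a), ("end", b)] := rfl
lemma pvR_update (a b c d : Int) : ((pvR a b).insert "start" c).insert "end" d = pvR c d := rfl

lemma pvGetD_of_get? (d : PySem.Dict Int Int) (k v : Int) (h : d.get? k = some v) :
    d.getD k 0 = v := by unfold PySem.Dict.getD; rw [h]; rfl

lemma pvContains_eq_isSome (d : PySem.Dict Int Int) (k : Int) :
    d.contains k = (d.get? k).isSome := by
  unfold PySem.Dict.contains PySem.Dict.get?
  induction d.items with
  | nil => rfl
  | cons p t ih => by_cases h : (p.1 == k) <;> simp [h, List.find?, ih]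

lemma pvKeys_eq (d : PySem.Dict Int Int) : d.keys = d.items.map Prod.fst := rfl

lemma pvEnumerate_append (xs : List Int) (x : Int) (s : Int) :
    PySem.List.enumerate (xs ++ [x]) s
      = PySem.List.enumerate xs s ++ [((s + xs.length : Int), x)] := by
  induction xs generalizing s with
  | nil => simp [PySem.List.enumerate_nil, PySem.List.enumerate_cons]
  | cons y t ih => simp [PySem.List.enumerate_cons, ih]; ring

lemma pvFoldl_stepBest_eq (F : PySem.Dict Int Int) (l : List (Int × Int)) (b : Int × Int × Int) :
    l.foldl (pvStepBest F) b = (pvCands F l).foldl pvSel b := by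
  rw [pvCands, List.foldl_map]; rfl

lemma pvSel_cases (b c : Int × Int × Int) : pvSel b c = b ∨ pvSel b c = c := by
  unfold pvSel; split_ifs <;> simp

lemma pvSel_comm (b c c' : Int × Int × Int) (h : c.2.2 ≠ c'.2.2) :
    pvSel (pvSel b c) c' = pvSel (pvSel b c') c := by
  obtain ⟨b1, b2, b3⟩ := b; obtain ⟨c1, c2, c3⟩ := c; obtain ⟨d1, d2, d3⟩ := c'
  simp only [pvSel] at *
  split_ifs <;> first | rfl | (exfalso; (try dsimp only at *); omega)

lemma pvFoldl_pvSel_mem (l : List (Int × Int × Int)) (b : Int × Int × Int) :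
    l.foldl pvSel b = b ∨ l.foldl pvSel b ∈ l := by
  induction l generalizing b with
  | nil => left; rfl
  | cons c t ih =>
      rcases ih (pvSel b c) with h | h
      · rcases pvSel_cases b c with h' | h'
        · left; rw [List.foldl_cons, h, h']
        · right; rw [List.foldl_cons, h, h']; exact List.mem_cons_self
      · right; exact List.mem_cons_of_mem _ h

-- replacing candidate cO by a strictly longer cN with the largest end: the fold result is
-- "select cN against the old result"
lemma pvSel_replace (l : List (Int × Int × Int)) (b cO cN : Int × Int × Int)
    (hlen : cO.1 < cN.1) (hb : b.2.2 < cN.2.2) (hO : cO.2.2 < cN.2.2)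
    (hl : ∀ c ∈ l, c.2.2 < cN.2.2) (hne : ∀ c ∈ l, c.2.2 ≠ cO.2.2) :
    l.foldl pvSel (pvSel b cN) = pvSel (l.foldl pvSel (pvSel b cO)) cN := by
  induction l generalizing b with
  | nil =>
      obtain ⟨b1, b2, b3⟩ := b; obtain ⟨o1, o2, o3⟩ := cO; obtain ⟨n1, n2, n3⟩ := cN
      simp only [List.foldl_nil, pvSel] at *
      split_ifs <;> first | rfl | (exfalso; (try dsimp only at *); omega)
  | cons c t ih =>
      have hcN : c.2.2 ≠ cN.2.2 := by have := hl c List.mem_cons_self; omega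
      have hcO : c.2.2 ≠ cO.2.2 := hne c List.mem_cons_self
      have hb' : (pvSel b c).2.2 < cN.2.2 := by
        rcases pvSel_cases b c with h | h <;> rw [h]
        · exact hb
        · exact hl c List.mem_cons_self
      calc t.foldl pvSel (pvSel (pvSel b cN) c)
          = t.foldl pvSel (pvSel (pvSel b c) cN) := by rw [pvSel_comm b cN c hcN.symm]
        _ = pvSel (t.foldl pvSel (pvSel (pvSel b c) cO)) cN := by
              exact ih (pvSel b c) hb' (fun x hx => hl x (List.mem_cons_of_mem _ hx))
                (fun x hx => hne x (List.mem_cons_of_mem _ hx))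
        _ = pvSel (t.foldl pvSel (pvSel (pvSel b cO) c)) cN := by rw [pvSel_comm b c cO hcO]

-- when the candidate's end is the largest so far the tie clause is dead and pvSel is A's rule
lemma pvSel_as_A (b c : Int × Int × Int) (h : b.2.2 ≤ c.2.2) :
    pvSel b c = if c.1 > b.1 then c else b := by
  obtain ⟨b1, b2, b3⟩ := b; obtain ⟨c1, c2, c3⟩ := c
  simp only [pvSel] at *
  split_ifs <;> first | rfl | (exfalso; omega)

-- split an association list at the (unique, by nodup) entry with first component x
lemma pvSplit_at_key (l : List (Int × Int)) (x : Int)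
    (hmem : x ∈ l.map Prod.fst) (hnd : (l.map Prod.fst).Nodup) :
    ∃ l1 e0 l2, l = l1 ++ (x, e0) :: l2 ∧ (∀ p ∈ l1, p.1 ≠ x) ∧ (∀ p ∈ l2, p.1 ≠ x) := by
  induction l with
  | nil => simp at hmem
  | cons p t ih =>
      by_cases hp : p.1 = x
      · refine ⟨[], p.2, t, by subst hp; simp, by simp, ?_⟩
        intro q hq hqx
        simp only [List.map_cons, List.nodup_cons] at hnd
        exact hnd.1 (hp ▸ hqx ▸ List.mem_map_of_mem hq)
      · have hmem' : x ∈ t.map Prod.fst := by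
          simp only [List.map_cons, List.mem_cons, List.mem_map] at hmem ⊢
          rcases hmem with h | h
          · exact absurd h.symm hp
          · exact h
        rcases ih hmem' ((List.nodup_cons.mp (by simpa using hnd)).2) with ⟨l1, e0, l2, he, h1, h2⟩
        exact ⟨p :: l1, e0, l2, by rw [he, List.cons_append], by
          intro q hq; rcases List.mem_cons.mp hq with h | h
          · exact h ▸ hp
          · exact h1 q h, h2⟩

lemma pvA_append (ys : List Int) (x : Int) :
    pvA (ys ++ [x]) =
      (match (pvA ys).1.get? x with
       | none => ((pvA ys).1.insert x (ys.length : Int), (pvA ys).2)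
       | some start =>
           if (ys.length : Int) - start > (pvA ys).2.getD "end" 0 - (pvA ys).2.getD "start" 0
           then ((pvA ys).1, ((pvA ys).2.insert "start" start).insert "end" (ys.length : Int))
           else pvA ys) := by
  have hn0 : (0 : Int) ≤ (ys.length : Int) := Int.natCast_nonneg _
  have hlen : (((ys ++ [x]).length : Nat) : Int) = (ys.length : Int) + 1 := by
    simp [List.length_append]
  have hcong : ∀ (acc : PySem.Dict Int Int × PySem.Dict String Int),
      ∀ i ∈ PySem.List.pyRange 0 (ys.length : Int) 1,
      pvStepA (ys ++ [x]) acc i = pvStepA ys acc i := by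
    intro acc i hi
    rcases (PySem.List.mem_pyRange_one).mp hi with ⟨hi0, hi1⟩
    have hget : PySem.List.pyGetD (ys ++ [x]) i 0 = PySem.List.pyGetD ys i 0 := by
      rw [PySem.List.pyGetD_eq_getElem _ _ hi0 (by simp [List.length_append]; omega),
          PySem.List.pyGetD_eq_getElem _ _ hi0 (by omega)]
      exact List.getElem_append_left (by omega)
    simp only [pvStepA, hget]
  have hx : PySem.List.pyGetD (ys ++ [x]) ((ys.length : Nat) : Int) 0 = x := by
    rw [PySem.List.pyGetD_natCast, List.getD_eq_getElem?_getD, List.getElem?_concat_length]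
    rfl
  show (PySem.List.pyRange 0 (((ys ++ [x]).length : Nat) : Int) 1).foldl (pvStepA (ys ++ [x])) _ = _
  rw [hlen, PySem.List.pyRange_one_succ_right hn0, List.foldl_append,
      PySem.List.foldl_congr_mem _ _ (pvStepA ys) _ hcong]
  show pvStepA (ys ++ [x]) (pvA ys) ((ys.length : Nat) : Int) = _
  simp only [pvStepA, hx]

lemma pvB_append (ys : List Int) (x : Int) :
    pvB (ys ++ [x]) = pvStepScan (pvB ys) ((ys.length : Int), x) := by
  show (PySem.List.enumerate (ys ++ [x]) 0).foldl pvStepScan _ = _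
  rw [pvEnumerate_append, List.foldl_append]
  simp [pvB]

-- the invariant tying A's state after the scan to B's two dicts and B's second-pass result
def pvInv (delta : List Int) : Prop :=
  (pvA delta).1 = (pvB delta).1 ∧
  (pvA delta).2 = pvR (pvBest delta).2.1 (pvBest delta).2.2 ∧
  (∀ p ∈ (pvB delta).2.items, 0 ≤ p.2 ∧ p.2 < (delta.length : Int)) ∧
  (((pvB delta).2.items.map Prod.snd).Pairwise (· ≠ ·)) ∧
  (∀ v, (pvB delta).2.contains v = true → (pvB delta).1.contains v = true) ∧
  (∀ v s', (pvB delta).1.get? v = some s' → -1 ≤ s' ∧ s' < (delta.length : Int)) ∧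
  (pvB delta).2.keys.Nodup ∧
  (∀ p ∈ (pvB delta).2.items, -1 ≤ (pvB delta).1.getD p.1 0 ∧ (pvB delta).1.getD p.1 0 ≤ p.2)

lemma pvCands_append (F : PySem.Dict Int Int) (l1 l2 : List (Int × Int)) :
    pvCands F (l1 ++ l2) = pvCands F l1 ++ pvCands F l2 := List.map_append ..

lemma pvItems_contains (d : PySem.Dict Int Int) {p : Int × Int} (hp : p ∈ d.items) :
    d.contains p.1 = true :=
  (PySem.Dict.contains_iff_mem_keys d p.1).mpr (by rw [pvKeys_eq]; exact List.mem_map_of_mem hp)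

lemma pvCands_props (F : PySem.Dict Int Int) (l : List (Int × Int)) (n : Int)
    (h7 : ∀ p ∈ l, 0 ≤ p.2 ∧ p.2 < n)
    (hC : ∀ p ∈ l, -1 ≤ F.getD p.1 0 ∧ F.getD p.1 0 ≤ p.2) :
    ∀ c ∈ pvCands F l, c.1 = c.2.2 - c.2.1 ∧ 0 ≤ c.1 ∧ 0 ≤ c.2.2 ∧ c.2.2 < n := by
  intro c hc
  rcases List.mem_map.mp hc with ⟨p, hp, rfl⟩
  rcases h7 p hp with ⟨hp1, hp2⟩
  rcases hC p hp with ⟨hq1, hq2⟩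
  dsimp
  refine ⟨by ring, by omega, by omega, by omega⟩

lemma pvFoldl_props (l : List (Int × Int × Int)) (n : Int)
    (h : ∀ c ∈ l, c.1 = c.2.2 - c.2.1 ∧ 0 ≤ c.1 ∧ 0 ≤ c.2.2 ∧ c.2.2 < n) :
    (l.foldl pvSel (0,0,0)).1 = (l.foldl pvSel (0,0,0)).2.2 - (l.foldl pvSel (0,0,0)).2.1 ∧
    0 ≤ (l.foldl pvSel (0,0,0)).1 ∧ 0 ≤ (l.foldl pvSel (0,0,0)).2.2 ∧
    ((l.foldl pvSel (0,0,0)).2.2 < n ∨ (l.foldl pvSel (0,0,0)).2.2 = 0) := by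
  rcases pvFoldl_pvSel_mem l (0,0,0) with h0 | hm
  · rw [h0]; norm_num
  · rcases h _ hm with ⟨a, b, c, d⟩; exact ⟨a, b, c, Or.inl d⟩

lemma pvMap_id (l : List (Int × Int)) (x : Int) (v : Int × Int)
    (h : ∀ p ∈ l, p.1 ≠ x) :
    l.map (fun p => if p.1 == x then v else p) = l := by
  have := List.map_congr_left (l := l) (f := fun p => if p.1 == x then v else p) (g := id)
    (fun p hp => by simp [h p hp])
  simpa using this

lemma pvInv_holds (delta : List Int) : pvInv delta := by
  induction delta using List.reverseRecOn with
  | nil =>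
      refine ⟨rfl, rfl, ?_, List.Pairwise.nil, ?_, ?_, List.Pairwise.nil, ?_⟩
      · intro p hp; exact absurd hp List.not_mem_nil
      · intro v hv
        rw [show (pvB []).2 = PySem.Dict.empty from rfl, PySem.Dict.contains_empty] at hv
        cases hv
      · intro v s' h
        rw [show (pvB []).1 = PySem.Dict.empty.insert 0 (-1) from rfl,
            PySem.Dict.get?_insert] at h
        split at h
        · injection h with h; constructor <;> omega
        · rw [PySem.Dict.get?_empty] at h; cases h
      · intro p hp; exact absurd hp List.not_mem_nil
  | append_singleton ys x ih =>
      obtain ⟨h1, h2, h7, h8, h9, h10, h11, hC⟩ := ih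
      have hn0 : (0 : Int) ≤ (ys.length : Int) := Int.natCast_nonneg _
      have hlen1 : (((ys ++ [x]).length : Nat) : Int) = (ys.length : Int) + 1 := by simp
      have hprops := pvFoldl_props _ _ (pvCands_props (pvB ys).1 (pvB ys).2.items
        ((ys.length : Int)) h7 hC)
      rw [show (pvCands (pvB ys).1 (pvB ys).2.items).foldl pvSel (0, 0, 0) = pvBest ys
        from rfl] at hprops
      obtain ⟨hp1, hp2, hp3, hp4⟩ := hprops
      rcases hF : (pvB ys).1.get? x with _ | s
      · -- x not yet a key of first: A inserts, res unchanged; B appends a zero-length candidate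
        have hFc : (pvB ys).1.contains x = false := by rw [pvContains_eq_isSome, hF]; rfl
        have hLc : (pvB ys).2.contains x = false := by
          cases hc : (pvB ys).2.contains x
          · rfl
          · exact absurd (h9 x hc) (by rw [hFc]; simp)
        have hBstep : pvB (ys ++ [x])
            = ((pvB ys).1.insert x (ys.length : Int), (pvB ys).2.insert x (ys.length : Int)) := by
          rw [pvB_append]; simp [pvStepScan, hFc]
        have hAstep : pvA (ys ++ [x]) = ((pvA ys).1.insert x (ys.length : Int), (pvA ys).2) := by
          rw [pvA_append, h1, hF]
        have hitems : ((pvB ys).2.insert x ((ys.length : Int))).items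
            = (pvB ys).2.items ++ [(x, (ys.length : Int))] :=
          PySem.Dict.items_insert_of_not_contains _ _ hLc
        have hmemF : ∀ p ∈ (pvB ys).2.items, p.1 ≠ x := by
          intro p hp hpx
          have hcp := h9 p.1 (pvItems_contains _ hp)
          rw [hpx, hFc] at hcp; cases hcp
        have hKeep : pvCands ((pvB ys).1.insert x (ys.length : Int)) (pvB ys).2.items
            = pvCands (pvB ys).1 (pvB ys).2.items := by
          apply List.map_congr_left
          intro p hp
          rw [PySem.Dict.getD_insert_of_ne _ _ _ (hmemF p hp)]
        have hKeepD : ∀ p ∈ (pvB ys).2.items,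
            ((pvB ys).1.insert x (ys.length : Int)).getD p.1 0 = (pvB ys).1.getD p.1 0 := by
          intro p hp
          rw [PySem.Dict.getD_insert_of_ne _ _ _ (hmemF p hp)]
        have hbest' : pvBest (ys ++ [x])
            = pvSel (pvBest ys) (0, (ys.length : Int), (ys.length : Int)) := by
          unfold pvBest
          rw [hBstep]
          dsimp only
          rw [hitems, pvCands_append, List.foldl_append, hKeep]
          show pvSel ((pvCands (pvB ys).1 (pvB ys).2.items).foldl pvSel (0, 0, 0))
            ((ys.length : Int) - ((pvB ys).1.insert x (ys.length : Int)).getD x 0,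
             ((pvB ys).1.insert x (ys.length : Int)).getD x 0, (ys.length : Int)) = _
          rw [PySem.Dict.getD_insert_self]
          norm_num
        have hbb : pvBest (ys ++ [x]) = pvBest ys := by
          rw [hbest']; unfold pvSel; split_ifs with h
          · exfalso; dsimp only at h; omega
          · rfl
        refine ⟨?_, ?_, ?_, ?_, ?_, ?_, ?_, ?_⟩
        · rw [hAstep, hBstep, h1]
        · rw [hAstep, hbb]; exact h2
        · intro p hp
          rw [hBstep] at hp; dsimp only at hp; rw [hitems] at hp
          rw [hlen1]
          rcases List.mem_append.mp hp with h | h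
          · rcases h7 p h with ⟨ha, hb⟩; exact ⟨ha, by omega⟩
          · rw [List.mem_singleton] at h; subst h; dsimp only; exact ⟨hn0, by omega⟩
        · rw [hBstep]; dsimp only; rw [hitems, List.map_append]
          refine List.pairwise_append.mpr ⟨h8, by simp, ?_⟩
          intro a ha b hb
          simp only [List.map_cons, List.map_nil, List.mem_singleton] at hb
          subst hb
          rcases List.mem_map.mp ha with ⟨p, hp, rfl⟩
          have := (h7 p hp).2; omega
        · intro v hv
          rw [hBstep] at hv ⊢; dsimp only at hv ⊢
          rw [PySem.Dict.contains_insert] at hv ⊢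
          simp only [Bool.or_eq_true] at hv ⊢
          rcases hv with h | h
          · exact Or.inl h
          · exact Or.inr (h9 v h)
        · intro v s' hv
          rw [hBstep] at hv; dsimp only at hv
          rw [PySem.Dict.get?_insert] at hv
          rw [hlen1]
          split at hv
          · injection hv with hv; rw [← hv]; exact ⟨by omega, by omega⟩
          · rcases h10 v s' hv with ⟨ha, hb⟩; exact ⟨ha, by omega⟩
        · rw [hBstep]; exact PySem.Dict.nodup_keys_insert _ _ _ h11
        · intro p hp
          rw [hBstep] at hp ⊢; dsimp only at hp ⊢; rw [hitems] at hp
          rcases List.mem_append.mp hp with h | h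
          · rw [hKeepD p h]; exact hC p h
          · rw [List.mem_singleton] at h; subst h; dsimp only
            rw [PySem.Dict.getD_insert_self]
            exact ⟨by omega, le_refl _⟩
      · -- x already a key of first: A updates the best, B overwrites/creates last[x]
        have hFc : (pvB ys).1.contains x = true := by rw [pvContains_eq_isSome, hF]; rfl
        have hs : (pvB ys).1.getD x 0 = s := pvGetD_of_get? _ _ _ hF
        have hsb := h10 x s hF
        have hBstep : pvB (ys ++ [x]) = ((pvB ys).1, (pvB ys).2.insert x (ys.length : Int)) := by
          rw [pvB_append]; simp [pvStepScan, hFc]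
        have hend : (pvBest ys).2.2 ≤ (ys.length : Int) := by rcases hp4 with h | h <;> omega
        have hAstep : pvA (ys ++ [x]) =
            (if (ys.length : Int) - s > (pvBest ys).1
             then ((pvA ys).1, pvR s (ys.length : Int)) else pvA ys) := by
          rw [pvA_append, h1, hF]
          dsimp only
          rw [h2, pvR_getD_end, pvR_getD_start, pvR_update,
              show (pvBest ys).2.2 - (pvBest ys).2.1 = (pvBest ys).1 from hp1.symm]
        cases hLc : (pvB ys).2.contains x with
        | false =>
            have hitems : ((pvB ys).2.insert x (ys.length : Int)).items
                = (pvB ys).2.items ++ [(x, (ys.length : Int))] :=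
              PySem.Dict.items_insert_of_not_contains _ _ hLc
            have hbest' : pvBest (ys ++ [x])
                = pvSel (pvBest ys) ((ys.length : Int) - s, s, (ys.length : Int)) := by
              unfold pvBest
              rw [hBstep]
              dsimp only
              rw [hitems, pvCands_append, List.foldl_append]
              show pvSel ((pvCands (pvB ys).1 (pvB ys).2.items).foldl pvSel (0, 0, 0))
                ((ys.length : Int) - (pvB ys).1.getD x 0, (pvB ys).1.getD x 0,
                 (ys.length : Int)) = _
              rw [hs]
            have hbb : pvBest (ys ++ [x]) = (if (ys.length : Int) - s > (pvBest ys).1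
                then ((ys.length : Int) - s, s, (ys.length : Int)) else pvBest ys) := by
              rw [hbest', pvSel_as_A _ _ (by dsimp only; exact hend)]
            refine ⟨?_, ?_, ?_, ?_, ?_, ?_, ?_, ?_⟩
            · rw [hAstep, hBstep]; split_ifs <;> exact h1
            · rw [hAstep, hbb]; split_ifs with hc
              · rfl
              · exact h2
            · intro p hp
              rw [hBstep] at hp; dsimp only at hp; rw [hitems] at hp
              rw [hlen1]
              rcases List.mem_append.mp hp with h | h
              · rcases h7 p h with ⟨ha, hb⟩; exact ⟨ha, by omega⟩
              · rw [List.mem_singleton] at h; subst h; dsimp only; exact ⟨hn0, by omega⟩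
            · rw [hBstep]; dsimp only; rw [hitems, List.map_append]
              refine List.pairwise_append.mpr ⟨h8, by simp, ?_⟩
              intro a ha b hb
              simp only [List.map_cons, List.map_nil, List.mem_singleton] at hb
              subst hb
              rcases List.mem_map.mp ha with ⟨p, hp, rfl⟩
              have := (h7 p hp).2; omega
            · intro v hv
              rw [hBstep] at hv ⊢; dsimp only at hv ⊢
              rw [PySem.Dict.contains_insert] at hv
              simp only [Bool.or_eq_true, beq_iff_eq] at hv
              rcases hv with h | h
              · subst h; exact hFc
              · exact h9 v h
            · intro v s' hv
              rw [hBstep] at hv; dsimp only at hv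
              rcases h10 v s' hv with ⟨ha, hb⟩
              rw [hlen1]; exact ⟨ha, by omega⟩
            · rw [hBstep]; exact PySem.Dict.nodup_keys_insert _ _ _ h11
            · intro p hp
              rw [hBstep] at hp ⊢; dsimp only at hp ⊢; rw [hitems] at hp
              rcases List.mem_append.mp hp with h | h
              · exact hC p h
              · rw [List.mem_singleton] at h; subst h; dsimp only
                rw [hs]; exact ⟨hsb.1, by omega⟩
        | true =>
            have hxk : x ∈ ((pvB ys).2.items).map Prod.fst := by
              rw [← pvKeys_eq]
              exact (PySem.Dict.contains_iff_mem_keys _ _).mp hLc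
            have hndk : (((pvB ys).2.items).map Prod.fst).Nodup := by
              rw [← pvKeys_eq]; exact h11
            obtain ⟨l1, e0, l2, hsplit, hnx1, hnx2⟩ := pvSplit_at_key _ _ hxk hndk
            have he0 : (x, e0) ∈ (pvB ys).2.items := by
              rw [hsplit]; exact List.mem_append_right _ List.mem_cons_self
            have he0b := h7 _ he0
            have hmem1 : ∀ p ∈ l1, p ∈ (pvB ys).2.items := by
              intro p hp; rw [hsplit]; exact List.mem_append_left _ hp
            have hmem2 : ∀ p ∈ l2, p ∈ (pvB ys).2.items := by
              intro p hp; rw [hsplit]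
              exact List.mem_append_right _ (List.mem_cons_of_mem _ hp)
            have hitems : ((pvB ys).2.insert x (ys.length : Int)).items
                = l1 ++ (x, (ys.length : Int)) :: l2 := by
              rw [PySem.Dict.items_insert_of_contains _ _ hLc, hsplit, List.map_append,
                  List.map_cons, pvMap_id l1 x _ hnx1, pvMap_id l2 x _ hnx2]
              simp
            have hcandsOld : pvCands (pvB ys).1 (pvB ys).2.items
                = pvCands (pvB ys).1 l1 ++ (e0 - s, s, e0) :: pvCands (pvB ys).1 l2 := by
              rw [hsplit]; simp only [pvCands, List.map_append, List.map_cons, hs]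
            have hcandsNew : pvCands (pvB ys).1 (l1 ++ (x, (ys.length : Int)) :: l2)
                = pvCands (pvB ys).1 l1
                  ++ ((ys.length : Int) - s, s, (ys.length : Int)) :: pvCands (pvB ys).1 l2 := by
              simp only [pvCands, List.map_append, List.map_cons, hs]
            have hb1 : ((pvCands (pvB ys).1 l1).foldl pvSel (0, 0, 0)).2.2 < (ys.length : Int) := by
              rcases pvFoldl_pvSel_mem (pvCands (pvB ys).1 l1) (0, 0, 0) with h | h
              · rw [h]; dsimp only; omega
              · rcases List.mem_map.mp h with ⟨p, hp, hpe⟩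
                rw [← hpe]; dsimp only; exact (h7 p (hmem1 p hp)).2
            have hl2 : ∀ c ∈ pvCands (pvB ys).1 l2, c.2.2 < (ys.length : Int) := by
              intro c hc; rcases List.mem_map.mp hc with ⟨p, hp, rfl⟩
              dsimp only; exact (h7 p (hmem2 p hp)).2
            have hne2 : ∀ c ∈ pvCands (pvB ys).1 l2, c.2.2 ≠ e0 := by
              have h8' := h8
              rw [hsplit, List.map_append, List.map_cons] at h8'
              have hcr := (List.pairwise_append.mp h8').2.1
              have hx2 := (List.pairwise_cons.mp hcr).1
              intro c hc; rcases List.mem_map.mp hc with ⟨p, hp, rfl⟩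
              dsimp only
              exact (hx2 p.2 (List.mem_map_of_mem hp)).symm
            have hbest' : pvBest (ys ++ [x])
                = pvSel (pvBest ys) ((ys.length : Int) - s, s, (ys.length : Int)) := by
              unfold pvBest
              rw [hBstep]; dsimp only
              rw [hitems, hcandsNew, List.foldl_append, List.foldl_cons,
                  pvSel_replace (pvCands (pvB ys).1 l2) _ (e0 - s, s, e0) _
                    (by dsimp only; omega) hb1 (by dsimp only; exact he0b.2) hl2 hne2,
                  hcandsOld, List.foldl_append, List.foldl_cons]
            have hbb : pvBest (ys ++ [x]) = (if (ys.length : Int) - s > (pvBest ys).1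
                then ((ys.length : Int) - s, s, (ys.length : Int)) else pvBest ys) := by
              rw [hbest', pvSel_as_A _ _ (by dsimp only; exact hend)]
            have hlt : ∀ p ∈ (pvB ys).2.items, p.2 < (ys.length : Int) := fun p hp => (h7 p hp).2
            refine ⟨?_, ?_, ?_, ?_, ?_, ?_, ?_, ?_⟩
            · rw [hAstep, hBstep]; split_ifs <;> exact h1
            · rw [hAstep, hbb]; split_ifs with hc
              · rfl
              · exact h2
            · intro p hp
              rw [hBstep] at hp; dsimp only at hp; rw [hitems] at hp
              rw [hlen1]
              rcases List.mem_append.mp hp with h | h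
              · rcases h7 p (hmem1 p h) with ⟨ha, hb⟩; exact ⟨ha, by omega⟩
              · rcases List.mem_cons.mp h with h | h
                · subst h; dsimp only; exact ⟨hn0, by omega⟩
                · rcases h7 p (hmem2 p h) with ⟨ha, hb⟩; exact ⟨ha, by omega⟩
            · have h8' := h8
              rw [hsplit, List.map_append, List.map_cons] at h8'
              obtain ⟨pw1, pw2, cross⟩ := List.pairwise_append.mp h8'
              obtain ⟨hx2, pwl2⟩ := List.pairwise_cons.mp pw2
              rw [hBstep]; dsimp only; rw [hitems, List.map_append, List.map_cons]
              refine List.pairwise_append.mpr ⟨pw1, List.pairwise_cons.mpr ⟨?_, pwl2⟩, ?_⟩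
              · intro b hb; rcases List.mem_map.mp hb with ⟨p, hp, rfl⟩
                have := hlt p (hmem2 p hp); dsimp only; omega
              · intro a ha b hb
                rcases List.mem_cons.mp hb with hb | hb
                · subst hb; rcases List.mem_map.mp ha with ⟨p, hp, rfl⟩
                  have := hlt p (hmem1 p hp); dsimp only; omega
                · exact cross a ha b (List.mem_cons_of_mem _ hb)
            · intro v hv
              rw [hBstep] at hv ⊢; dsimp only at hv ⊢
              rw [PySem.Dict.contains_insert] at hv
              simp only [Bool.or_eq_true, beq_iff_eq] at hv
              rcases hv with h | h
              · subst h; exact hFc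
              · exact h9 v h
            · intro v s' hv
              rw [hBstep] at hv; dsimp only at hv
              rcases h10 v s' hv with ⟨ha, hb⟩
              rw [hlen1]; exact ⟨ha, by omega⟩
            · rw [hBstep]; exact PySem.Dict.nodup_keys_insert _ _ _ h11
            · intro p hp
              rw [hBstep] at hp ⊢; dsimp only at hp ⊢; rw [hitems] at hp
              rcases List.mem_append.mp hp with h | h
              · exact hC p (hmem1 p h)
              · rcases List.mem_cons.mp h with h | h
                · subst h; dsimp only; rw [hs]; exact ⟨hsb.1, by omega⟩
                · exact hC p (hmem2 p h)

-- ===== VERDICT (by name: the statement is the Claim_ definition above) =====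
theorem get_longest_match_spec : Claim_equal_get_longest_match := by
  intro delta _
  obtain ⟨h1, h2, -⟩ := pvInv_holds delta
  show get_longest_match delta = get_longest_match_alt delta
  have ha : get_longest_match delta = (pvA delta).2.items := rfl
  have hb : get_longest_match_alt delta
      = [("start", (pvBest delta).2.1), ("end", (pvBest delta).2.2)] := by
    show [("start", ((pvB delta).2.items.foldl (pvStepBest (pvB delta).1) (0,0,0)).2.1),
          ("end", ((pvB delta).2.items.foldl (pvStepBest (pvB delta).1) (0,0,0)).2.2)] = _
    rw [pvFoldl_stepBest_eq]; rfl
  rw [ha, hb, h2, pvR_items]
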